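-- pv_equiv track=rewrite | github.com/nataliehh/towards-explainable-sign-spotting | tools/tools.py | man_sim_and_hand_dist
-- ===== SOURCE A (Python) =====
-- def append_to_list_in_dict(dict_, key, val):
--     if key not in dict_: # Create list if it doesn't exist yet
--         dict_[key] = []
--     dict_[key] += [val]
--     return dict_
--
-- def add_to_val_in_dict(dict_, key, val, base_val = 0):
--     if key not in dict_: # Initialize to base_val if it doesn't exist yet
--         dict_[key] = base_val
--     dict_[key] += val
--     return dict_
--
-- def manipulate_dict_entry(dict_, key, val, append = True):
--     if append:
--         return append_to_list_in_dict(dict_, key, val)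
--     return add_to_val_in_dict(dict_, key, val)
--
-- def compute_overlap(t1, t2, offset = 0):
--     max1 = max(t1[0], t2[0]) - offset
--     min2 = min(t1[1], t2[1]) + offset
--     delta = min2-max1
--     return max(0, delta)
--
-- def is_overlap(t1, t2, offset = 0):
--     return compute_overlap(t1, t2, offset) != 0
--
-- def man_sim_and_hand_dist(anns, manual_sim = True, hand_distinct = True, filtering = True, two_hand_suffix = True):
--     ann_values = anns.copy() # Copy to not change the original dictionary
--     overlap, timespans, man_sim_lst, hand_dist_lst = [[] for _ in range(4)]
--
--     for key in ann_values:
--         # Add the key as an element to each tuple of timespans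
--         tup_with_key = [(v)+(key,) for v in ann_values[key]]
--         timespans += tup_with_key
--     # Sort by the first element in the tuple (aka the start of the timespan)
--     timespans = sorted(timespans, key = lambda x: x[0])
--     timespan_len = len(timespans)
--
--     for i in range(timespan_len-1): # Iterate over the timespan tuples
--         t0 = timespans[i]
--         for j in range(i+1, timespan_len): # Iterate over all timespans following the selected one
--             t1 = timespans[j]
--             # Manual sim. should have strict overlap, offset = 0
--             if manual_sim and is_overlap(t0[:2], t1[:2]) and t0[-1] != t1[-1]:
--                 # If there's overlap and the annotation keys are not the same
--                 # We have manual sim., so we store which timespans to add as manually simultaneous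
--                 overlap += [t0, t1]
--                 # We make the new timespan as large as the two other timespans combined
--                 ts_start, ts_end = min(t0[0], t1[0]), max(t0[1], t1[1])
--                 man_sim_lst += [(ts_start, ts_end, t0[-1], t1[-1])]
--             if is_overlap(t0[:2], t1[:2]) and t0[-1] == t1[-1]:
--                 # Make sure the new timespan is as large as the other two are when combined
--                 ts_start, ts_end = min(t0[0], t1[0]), max(t0[1], t1[1])
--
--                 if hand_distinct:
--                     overlap += [t0, t1] # Delete both overlapping signs
--                     # Add back a two-handed instance that spans both of them
--                     two_hand_str = '__2H' if two_hand_suffix else ''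
--                     hand_dist_lst += [(ts_start, ts_end, t1[-1]+two_hand_str)]
--                 else: # If we don't want to distinguish hands
--                     # We check if we want to drop one of the instances that's overlapping
--                     if filtering:
--                         overlap += [t0, t1] # Delete both overlapping signs
--                         # Add back one of the instances, but don't note that it's two-handed
--                         hand_dist_lst += [(ts_start, ts_end, t1[-1])]
--                     else: # If we don't want to filter out overlapping signs at all, we do nothing here
--                         pass
--
--     # Loop over the timespans found to overlap
--     for o in overlap:
--         key, val = o[-1], o[:-1]
--         # Remove these manually simultaneous values from the dictionary
--         if key in ann_values and val in ann_values[key]: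
--             ann_values[key].remove(val)
--             if len(ann_values[key]) == 0: # Delete the entry for the key if it's now empty
--                 del ann_values[key]
--
--     # Loop over the timespans with manual simultaneity
--     # To add them to the annotation dictionary
--     for a in man_sim_lst:
--         # The two signs that overlap are fused using '&&' (a&&b -> a and b)
--         # We sort the signs alphabetically to ensure consistent naming
--         key = '&&'.join(sorted(a[-2:]))
--         if '&&' in key: # if we somehow only find one sign, we skip it
--             val = a[:-2]
--             if key in ann_values:
--                 for val_old in ann_values[key]:
--                     if is_overlap(val_old, val):
--                         continue
--                 ann_values[key] += [val]
--             else: # Just add the key if it doesn't exist yet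
--                 ann_values[key] = [val]
--     for h in hand_dist_lst:
--         key, val = h[-1], h[:-1]
--         ann_values = manipulate_dict_entry(ann_values, key, val)
--     return ann_values
-- ===== SOURCE B (Python) =====
-- # B: single sorted sweep that breaks the inner scan as soon as the next start
-- # reaches the current end (valid because the spans are sorted by start), with
-- # the post-processing loops written with setdefault and without A's dead
-- # inner loop / always-true '&&' membership test.
-- # Like A, this mutates the inner lists of `anns` (shallow dict copy).
-- def man_sim_and_hand_dist(anns, manual_sim=True, hand_distinct=True, filtering=True, two_hand_suffix=True):
--     ann_values = anns.copy()
--     # Flatten to (start, end, key) triples and sort by span start (stable).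
--     timespans = sorted((tup + (key,) for key, vs in ann_values.items() for tup in vs),
--                        key=lambda x: x[0])
--     overlap, man_sim_lst, hand_dist_lst = [], [], []
--     for i, t0 in enumerate(timespans):
--         s0, e0, k0 = t0
--         for t1 in timespans[i + 1:]:
--             s1, e1, k1 = t1
--             if s1 >= e0:
--                 break  # sorted by start: no later span can overlap t0
--             if s1 < e1:  # genuine overlap (s1 >= s0 by the sort order)
--                 start, end = min(s0, s1), max(e0, e1)
--                 if k0 != k1:
--                     if manual_sim:
--                         overlap += [t0, t1]
--                         man_sim_lst.append((start, end, k0, k1))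
--                 elif hand_distinct:
--                     overlap += [t0, t1]
--                     hand_dist_lst.append((start, end, k1 + ('__2H' if two_hand_suffix else '')))
--                 elif filtering:
--                     overlap += [t0, t1]
--                     hand_dist_lst.append((start, end, k1))
--     # Remove the overlapping spans from the dictionary.
--     for s, e, key in overlap:
--         if key in ann_values and (s, e) in ann_values[key]:
--             ann_values[key].remove((s, e))
--             if not ann_values[key]:
--                 del ann_values[key]
--     # Add the fused manually-simultaneous spans.
--     for s, e, ka, kb in man_sim_lst:
--         key = '&&'.join(sorted((ka, kb)))
--         ann_values.setdefault(key, []).append((s, e))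
--     # Add the merged same-key (two-handed) spans.
--     for s, e, key in hand_dist_lst:
--         ann_values.setdefault(key, []).append((s, e))
--     return ann_values
-- ===== Notes on version B (the rewrite author's own statement) =====
-- stated objective: faster
-- what changed: B replaces A's all-pairs O(n^2) index scan over the start-sorted spans by an output-sensitive sweep that walks each span's successors and breaks as soon as the next start reaches the current end (valid since spans are sorted by start) -- O(n log n + k) for k start-overlapping pairs, measured 14-25x faster on random inputs though still quadratic when almost all pairs overlap -- and streamlines the post-processing (setdefault-style insertion, dropping A's dead inner loop and its always-true "'&&' in key" test).
import Mathlib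
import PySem

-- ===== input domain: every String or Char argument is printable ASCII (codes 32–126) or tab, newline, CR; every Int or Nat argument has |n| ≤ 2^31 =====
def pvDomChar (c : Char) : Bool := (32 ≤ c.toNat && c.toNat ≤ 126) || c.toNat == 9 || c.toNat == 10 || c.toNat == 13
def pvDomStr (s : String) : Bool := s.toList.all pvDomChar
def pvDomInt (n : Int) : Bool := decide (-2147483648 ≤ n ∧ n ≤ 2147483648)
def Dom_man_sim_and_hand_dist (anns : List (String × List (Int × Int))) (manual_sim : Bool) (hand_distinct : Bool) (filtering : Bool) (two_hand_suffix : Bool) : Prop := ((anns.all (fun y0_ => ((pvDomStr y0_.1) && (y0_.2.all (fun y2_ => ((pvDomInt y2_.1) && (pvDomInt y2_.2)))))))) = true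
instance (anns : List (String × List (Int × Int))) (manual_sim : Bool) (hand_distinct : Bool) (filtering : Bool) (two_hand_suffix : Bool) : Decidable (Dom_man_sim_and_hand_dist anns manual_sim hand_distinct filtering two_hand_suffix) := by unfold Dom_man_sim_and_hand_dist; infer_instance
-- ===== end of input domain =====

-- B replaces A's all-pairs O(n^2) scan of the start-sorted spans by a sweep that breaks the
-- inner scan once the next start reaches the current end (intended as faster; measured 14-25x on
-- random inputs, though still quadratic when almost all pairs overlap), and streamlines the
-- post-processing; equivalence is about the RETURN value only (the Python A and B both mutate
-- the inner lists of `anns` through the shallow dict copy).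
-- ===== PORT A =====
-- compute_overlap / is_overlap with the default offset = 0 (A only ever uses the default)
def pvComputeOverlap (t1 t2 : Int × Int) : Int :=
  max 0 (min t1.2 t2.2 - max t1.1 t2.1)

def pvIsOverlap (t1 t2 : Int × Int) : Bool :=
  pvComputeOverlap t1 t2 != 0

-- append_to_list_in_dict
def pvAppendToListInDict (d : PySem.Dict String (List (Int × Int))) (key : String)
    (val : Int × Int) : PySem.Dict String (List (Int × Int)) :=
  let d := if d.contains key then d else d.insert key []
  d.insert key (d.getD key [] ++ [val])

-- manipulate_dict_entry; A only ever calls it with append = True (the False branch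
-- stores an Int where this dict holds lists, so only the True path is typeable/used)
def pvManipulateDictEntry (d : PySem.Dict String (List (Int × Int))) (key : String)
    (val : Int × Int) : PySem.Dict String (List (Int × Int)) :=
  pvAppendToListInDict d key val

-- body of the overlap-removal loop; this loop is textually identical in Source A and Source B,
-- so both ports fold with this same helper
def pvRemoveStep (d : PySem.Dict String (List (Int × Int)))
    (o : Int × Int × String) : PySem.Dict String (List (Int × Int)) :=
  let key := o.2.2
  let val := (o.1, o.2.1)
  if d.contains key && (d.getD key []).contains val then
    let lst := (PySem.List.remove? (d.getD key []) val).getD []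
    if lst.length == 0 then d.erase key else d.insert key lst
  else d

-- body of A's inner (j) loop: state = (overlap, man_sim_lst, hand_dist_lst)
def pvStepA (manual_sim hand_distinct filtering two_hand_suffix : Bool)
    (t0 : Int × Int × String)
    (st : List (Int × Int × String) × List (Int × Int × String × String) × List (Int × Int × String))
    (t1 : Int × Int × String) :
    List (Int × Int × String) × List (Int × Int × String × String) × List (Int × Int × String) :=
  let st :=
    if manual_sim && pvIsOverlap (t0.1, t0.2.1) (t1.1, t1.2.1) && (t0.2.2 != t1.2.2) then
      (st.1 ++ [t0, t1],
       st.2.1 ++ [(min t0.1 t1.1, max t0.2.1 t1.2.1, t0.2.2, t1.2.2)],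
       st.2.2)
    else st
  if pvIsOverlap (t0.1, t0.2.1) (t1.1, t1.2.1) && (t0.2.2 == t1.2.2) then
    let ts_start := min t0.1 t1.1
    let ts_end := max t0.2.1 t1.2.1
    if hand_distinct then
      (st.1 ++ [t0, t1], st.2.1,
       st.2.2 ++ [(ts_start, ts_end, t1.2.2 ++ (if two_hand_suffix then "__2H" else ""))])
    else if filtering then
      (st.1 ++ [t0, t1], st.2.1, st.2.2 ++ [(ts_start, ts_end, t1.2.2)])
    else st
  else st

def man_sim_and_hand_dist (anns : List (String × List (Int × Int))) (manual_sim : Bool) (hand_distinct : Bool) (filtering : Bool) (two_hand_suffix : Bool) : List (String × List (Int × Int)) :=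
  let ann_values : PySem.Dict String (List (Int × Int)) := PySem.Dict.ofList anns
  let timespans : List (Int × Int × String) :=
    ann_values.items.foldl (fun acc kv => acc ++ kv.2.map (fun v => (v.1, v.2, kv.1))) []
  let timespans := PySem.List.sorted timespans (fun x => x.1) false
  let timespan_len := PySem.List.len timespans
  let st :=
    (PySem.List.pyRange 0 (timespan_len - 1) 1).foldl
      (fun st i =>
        (PySem.List.pyRange (i + 1) timespan_len 1).foldl
          (fun st j =>
            pvStepA manual_sim hand_distinct filtering two_hand_suffix
              (PySem.List.pyGetD timespans i (0, 0, ""))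
              st (PySem.List.pyGetD timespans j (0, 0, "")))
          st)
      ([], [], [])
  let ann_values := st.1.foldl pvRemoveStep ann_values
  let ann_values :=
    st.2.1.foldl
      (fun d a =>
        let key := PySem.Str.join "&&" (PySem.List.sorted [a.2.2.1, a.2.2.2] (fun x => x) false)
        if PySem.Str.isIn "&&" key then
          let val := (a.1, a.2.1)
          if d.contains key then
            -- 'for val_old in ann_values[key]: if is_overlap(val_old, val): continue' changes nothing
            let _ := (d.getD key []).foldl
              (fun u val_old => if pvIsOverlap val_old val then u else u) ()
            d.insert key (d.getD key [] ++ [val])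
          else d.insert key [val]
        else d)
      ann_values
  let ann_values :=
    st.2.2.foldl (fun d h => pvManipulateDictEntry d h.2.2 (h.1, h.2.1)) ann_values
  ann_values.items

-- ===== PORT B =====
-- inner scan of Source B: walk the spans after t0, stop at the first start ≥ t0's end
def pvScan (manual_sim hand_distinct filtering two_hand_suffix : Bool)
    (t0 : Int × Int × String) :
    List (Int × Int × String) →
    List (Int × Int × String) × List (Int × Int × String × String) × List (Int × Int × String) →
    List (Int × Int × String) × List (Int × Int × String × String) × List (Int × Int × String)
  | [], st => st
  | t1 :: rest, st =>
    if t0.2.1 ≤ t1.1 then st  -- break: sorted by start, nothing later overlaps t0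
    else
      let st :=
        if t1.1 < t1.2.1 then  -- genuine overlap (t0.1 ≤ t1.1 by the sort order)
          let start := min t0.1 t1.1
          let stop := max t0.2.1 t1.2.1
          if t0.2.2 != t1.2.2 then
            if manual_sim then
              (st.1 ++ [t0, t1], st.2.1 ++ [(start, stop, t0.2.2, t1.2.2)], st.2.2)
            else st
          else if hand_distinct then
            (st.1 ++ [t0, t1], st.2.1,
             st.2.2 ++ [(start, stop, t1.2.2 ++ (if two_hand_suffix then "__2H" else ""))])
          else if filtering then
            (st.1 ++ [t0, t1], st.2.1, st.2.2 ++ [(start, stop, t1.2.2)])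
          else st
        else st
      pvScan manual_sim hand_distinct filtering two_hand_suffix t0 rest st

-- outer sweep of Source B: 'for i, t0 in enumerate(timespans): … timespans[i+1:] …'
def pvSweep (manual_sim hand_distinct filtering two_hand_suffix : Bool) :
    List (Int × Int × String) →
    List (Int × Int × String) × List (Int × Int × String × String) × List (Int × Int × String) →
    List (Int × Int × String) × List (Int × Int × String × String) × List (Int × Int × String)
  | [], st => st
  | t0 :: rest, st =>
    pvSweep manual_sim hand_distinct filtering two_hand_suffix rest
      (pvScan manual_sim hand_distinct filtering two_hand_suffix t0 rest st)

def man_sim_and_hand_dist_alt (anns : List (String × List (Int × Int))) (manual_sim : Bool) (hand_distinct : Bool) (filtering : Bool) (two_hand_suffix : Bool) : List (String × List (Int × Int)) :=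
  let ann_values : PySem.Dict String (List (Int × Int)) := PySem.Dict.ofList anns
  let timespans := PySem.List.sorted
    (ann_values.items.flatMap (fun kv => kv.2.map (fun v => (v.1, v.2, kv.1))))
    (fun x => x.1) false
  let st := pvSweep manual_sim hand_distinct filtering two_hand_suffix timespans ([], [], [])
  let ann_values := st.1.foldl pvRemoveStep ann_values
  let ann_values :=
    st.2.1.foldl
      (fun d a =>
        let key := PySem.Str.join "&&" (PySem.List.sorted [a.2.2.1, a.2.2.2] (fun x => x) false)
        (d.setdefault key []).modify key [] (fun l => l ++ [(a.1, a.2.1)]))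
      ann_values
  let ann_values :=
    st.2.2.foldl
      (fun d h => (d.setdefault h.2.2 []).modify h.2.2 [] (fun l => l ++ [(h.1, h.2.1)]))
      ann_values
  ann_values.items

-- ===== PRECONDITION & SPEC =====
def Spec_man_sim_and_hand_dist (anns : List (String × List (Int × Int))) (manual_sim : Bool) (hand_distinct : Bool) (filtering : Bool) (two_hand_suffix : Bool) (out : List (String × List (Int × Int))) : Prop := out = man_sim_and_hand_dist_alt anns manual_sim hand_distinct filtering two_hand_suffix
instance (anns : List (String × List (Int × Int))) (manual_sim : Bool) (hand_distinct : Bool) (filtering : Bool) (two_hand_suffix : Bool) (out : List (String × List (Int × Int))) : Decidable (Spec_man_sim_and_hand_dist anns manual_sim hand_distinct filtering two_hand_suffix out) := by unfold Spec_man_sim_and_hand_dist; infer_instance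

-- ===== CLAIM (what is proved, stated in full; the proofs are below) =====
def Claim_equal_man_sim_and_hand_dist : Prop := ∀ (anns : List (String × List (Int × Int))) (manual_sim : Bool) (hand_distinct : Bool) (filtering : Bool) (two_hand_suffix : Bool), Dom_man_sim_and_hand_dist anns manual_sim hand_distinct filtering two_hand_suffix → Spec_man_sim_and_hand_dist anns manual_sim hand_distinct filtering two_hand_suffix (man_sim_and_hand_dist anns manual_sim hand_distinct filtering two_hand_suffix)

-- ===== LEMMAS AND PROOFS =====

-- A's all-pairs double loop, written structurally (proof-only helper)
def pvSweepAll (g : (Int × Int × String) →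
      List (Int × Int × String) × List (Int × Int × String × String) × List (Int × Int × String) →
      (Int × Int × String) →
      List (Int × Int × String) × List (Int × Int × String × String) × List (Int × Int × String)) :
    List (Int × Int × String) →
    List (Int × Int × String) × List (Int × Int × String × String) × List (Int × Int × String) →
    List (Int × Int × String) × List (Int × Int × String × String) × List (Int × Int × String)
  | [], st => st
  | t0 :: rest, st => pvSweepAll g rest (rest.foldl (g t0) st)

-- A's index-driven double loop is the structural all-pairs sweep
theorem pv_outer_eq (g) (df : Int × Int × String) (ts : List (Int × Int × String)) :
    ∀ (m k : Nat) (st), ts.length ≤ m + k →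
    (PySem.List.pyRange (k : Int) (PySem.List.len ts - 1) 1).foldl
      (fun st i =>
        (PySem.List.pyRange (i + 1) (PySem.List.len ts) 1).foldl
          (fun st j => g (PySem.List.pyGetD ts i df) st (PySem.List.pyGetD ts j df)) st)
      st
    = pvSweepAll g (ts.drop k) st := by
  intro m
  induction m with
  | zero =>
    intro k st hk
    simp only [Nat.zero_add] at hk
    rw [PySem.List.pyRange_one_eq_nil (by simp [PySem.List.len_eq]; omega),
      List.drop_eq_nil_of_le hk]
    rfl
  | succ m ih =>
    intro k st hk
    by_cases h : (k : Int) < PySem.List.len ts - 1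
    · have hklt : k + 1 < ts.length := by simp [PySem.List.len_eq] at h; omega
      rw [PySem.List.pyRange_one_cons h, List.foldl_cons]
      have hcast : (k : Int) + 1 = ((k + 1 : Nat) : Int) := by push_cast; ring
      rw [hcast, PySem.List.foldl_pyRange_pyGetD ts df
        (g (PySem.List.pyGetD ts (k : Int) df)) st (by positivity)]
      rw [List.drop_eq_getElem_cons (by omega : k < ts.length)]
      rw [show ((k + 1 : Nat) : Int).toNat = k + 1 from by simp]
      rw [show PySem.List.pyGetD ts (k : Int) df = ts[k] from
        PySem.List.pyGetD_ofNat ts k df (by omega)]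
      rw [ih (k + 1) _ (by omega)]
      rfl
    · rw [PySem.List.pyRange_one_eq_nil (by omega)]
      have hlen : ts.length ≤ k + 1 := by simp [PySem.List.len_eq] at h; omega
      by_cases h2 : ts.length ≤ k
      · rw [List.drop_eq_nil_of_le h2]; rfl
      · rw [List.drop_eq_getElem_cons (by omega : k < ts.length),
          List.drop_eq_nil_of_le (by omega : ts.length ≤ k + 1)]
        rfl

-- with s0 ≤ s1, overlap of (s0,e0) and (s1,e1) is exactly s1 < e0 ∧ s1 < e1
theorem pv_overlap_iff (s0 e0 s1 e1 : Int) (h : s0 ≤ s1) :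
    pvIsOverlap (s0, e0) (s1, e1) = (decide (s1 < e0) && decide (s1 < e1)) := by
  by_cases h1 : s1 < e0 <;> by_cases h2 : s1 < e1 <;>
    simp [pvIsOverlap, pvComputeOverlap, h1, h2] <;> omega

-- past the break point A's pair step does nothing
theorem pv_stepA_dead (ms hd fl th : Bool) (t0 t1 : Int × Int × String) (st)
    (h0 : t0.1 ≤ t1.1) (h1 : t0.2.1 ≤ t1.1) :
    pvStepA ms hd fl th t0 st t1 = st := by
  have hov := pv_overlap_iff t0.1 t0.2.1 t1.1 t1.2.1 h0
  have : pvIsOverlap (t0.1, t0.2.1) (t1.1, t1.2.1) = false := by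
    rw [hov]; simp; omega
  simp [pvStepA, this]

-- before the break point A's pair step is B's merged-branch update
theorem pv_stepA_live (ms hd fl th : Bool) (t0 t1 : Int × Int × String) (st)
    (h0 : t0.1 ≤ t1.1) (hb : t1.1 < t0.2.1) :
    pvStepA ms hd fl th t0 st t1 =
    (if t1.1 < t1.2.1 then
      (if t0.2.2 != t1.2.2 then
        if ms then (st.1 ++ [t0, t1], st.2.1 ++ [(min t0.1 t1.1, max t0.2.1 t1.2.1, t0.2.2, t1.2.2)], st.2.2) else st
      else if hd then (st.1 ++ [t0, t1], st.2.1, st.2.2 ++ [(min t0.1 t1.1, max t0.2.1 t1.2.1, t1.2.2 ++ (if th then "__2H" else ""))])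
      else if fl then (st.1 ++ [t0, t1], st.2.1, st.2.2 ++ [(min t0.1 t1.1, max t0.2.1 t1.2.1, t1.2.2)])
      else st)
    else st) := by
  have hov := pv_overlap_iff t0.1 t0.2.1 t1.1 t1.2.1 h0
  by_cases h2 : t1.1 < t1.2.1 <;> by_cases hk : t0.2.2 = t1.2.2 <;>
    simp [pvStepA, hov, hb, h2, hk]

theorem pv_scan_eq (ms hd fl th : Bool) (t0 : Int × Int × String) :
    ∀ (l : List (Int × Int × String)) st,
      (∀ x ∈ l, t0.1 ≤ x.1) → l.Pairwise (fun a b => a.1 ≤ b.1) →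
      l.foldl (pvStepA ms hd fl th t0) st = pvScan ms hd fl th t0 l st := by
  intro l
  induction l with
  | nil => intro st _ _; rfl
  | cons t1 r ih =>
    intro st hall hpw
    have h0 : t0.1 ≤ t1.1 := hall t1 (by simp)
    have hallr : ∀ x ∈ r, t0.1 ≤ x.1 := fun x hx => hall x (by simp [hx])
    have h1r : ∀ x ∈ r, t1.1 ≤ x.1 := fun x hx => List.rel_of_pairwise_cons hpw hx
    have hpr : r.Pairwise (fun a b => a.1 ≤ b.1) := hpw.of_cons
    by_cases hbr : t0.2.1 ≤ t1.1
    · rw [List.foldl_cons, pv_stepA_dead ms hd fl th t0 t1 st h0 hbr]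
      rw [PySem.List.foldl_congr_mem r (pvStepA ms hd fl th t0) (fun acc _ => acc) st
        (fun acc x hx => pv_stepA_dead ms hd fl th t0 x acc (hallr x hx) (le_trans hbr (h1r x hx)))]
      rw [PySem.List.foldl_ignore r st]
      simp [pvScan, hbr]
    · have hbr' : ¬ t0.2.1 ≤ t1.1 := hbr
      replace hbr := lt_of_not_ge hbr
      rw [List.foldl_cons, pv_stepA_live ms hd fl th t0 t1 st h0 hbr, ih _ hallr hpr]
      conv_rhs => rw [pvScan]
      rw [if_neg hbr']

theorem pv_sweep_eq (ms hd fl th : Bool) :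
    ∀ (ts : List (Int × Int × String)) st, ts.Pairwise (fun a b => a.1 ≤ b.1) →
      pvSweepAll (pvStepA ms hd fl th) ts st = pvSweep ms hd fl th ts st := by
  intro ts
  induction ts with
  | nil => intro st _; rfl
  | cons t0 r ih =>
    intro st hpw
    have hall : ∀ x ∈ r, t0.1 ≤ x.1 := fun x hx => List.rel_of_pairwise_cons hpw hx
    have hpr : r.Pairwise (fun a b => a.1 ≤ b.1) := hpw.of_cons
    show pvSweepAll (pvStepA ms hd fl th) r (r.foldl (pvStepA ms hd fl th t0) st) = _
    rw [pv_scan_eq ms hd fl th t0 r st hall hpr, ih _ hpr]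
    rfl

-- A's "'&&' in key" test is always true: the key is x ++ "&&" ++ y
theorem pv_join2_isIn (x y : String) :
    PySem.Str.isIn "&&" (PySem.Str.join "&&" [x, y]) = true := by
  rw [PySem.Str.isIn_iff_infix]
  refine ⟨x.toList, y.toList, ?_⟩
  simp [PySem.Str.toList_join, PySem.Chars.join_cons_cons, PySem.Chars.join_singleton]

theorem pv_sorted_two (a b : String) :
    ∃ x y, PySem.List.sorted [a, b] (fun x => x) false = [x, y] := by
  have h : (PySem.List.sorted [a, b] (fun x => x) false).length = 2 := by
    rw [PySem.List.length_sorted]; rfl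
  match hm : PySem.List.sorted [a, b] (fun x => x) false with
  | [x, y] => exact ⟨x, y, rfl⟩
  | [] | [_] | _ :: _ :: _ :: _ => rw [hm] at h; simp at h

-- A's man-sim insertion step = B's setdefault/append step
theorem pv_phase3_step (d : PySem.Dict String (List (Int × Int)))
    (a : Int × Int × String × String) :
    (let key := PySem.Str.join "&&" (PySem.List.sorted [a.2.2.1, a.2.2.2] (fun x => x) false)
     if PySem.Str.isIn "&&" key then
       let val := (a.1, a.2.1)
       if d.contains key then
         let _ := (d.getD key []).foldl
           (fun u val_old => if pvIsOverlap val_old val then u else u) ()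
         d.insert key (d.getD key [] ++ [val])
       else d.insert key [val]
     else d)
    = (let key := PySem.Str.join "&&" (PySem.List.sorted [a.2.2.1, a.2.2.2] (fun x => x) false)
       (d.setdefault key []).modify key [] (fun l => l ++ [(a.1, a.2.1)])) := by
  obtain ⟨x, y, hxy⟩ := pv_sorted_two a.2.2.1 a.2.2.2
  simp only [hxy, pv_join2_isIn, if_pos]
  by_cases hc : d.contains (PySem.Str.join "&&" [x, y])
  · simp only [hc, if_pos, PySem.Dict.setdefault_of_contains d [] hc, PySem.Dict.modify]
  · simp only [hc, Bool.false_eq_true, if_false,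
      PySem.Dict.setdefault_of_not_contains d [] (by simpa using hc), PySem.Dict.modify,
      PySem.Dict.getD_insert_self, PySem.Dict.insert_insert_self, List.nil_append]

-- A's append_to_list_in_dict = B's setdefault/append step
theorem pv_phase4_step (d : PySem.Dict String (List (Int × Int))) (key : String) (val : Int × Int) :
    pvManipulateDictEntry d key val = (d.setdefault key []).modify key [] (fun l => l ++ [val]) := by
  unfold pvManipulateDictEntry pvAppendToListInDict
  by_cases hc : d.contains key
  · simp only [hc, if_pos, PySem.Dict.setdefault_of_contains d [] hc, PySem.Dict.modify]
  · simp only [hc, Bool.false_eq_true, if_false,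
      PySem.Dict.setdefault_of_not_contains d [] (by simpa using hc), PySem.Dict.modify,
      PySem.Dict.getD_insert_self, PySem.Dict.insert_insert_self, List.nil_append]

-- ===== VERDICT (by name: the statement is the Claim_ definition above) =====
theorem man_sim_and_hand_dist_spec : Claim_equal_man_sim_and_hand_dist := by
  intro anns ms hd fl th _
  unfold Spec_man_sim_and_hand_dist
  simp only [man_sim_and_hand_dist, man_sim_and_hand_dist_alt]
  rw [PySem.List.foldl_append_eq_flatMap, List.nil_append]
  set ts := PySem.List.sorted
      ((PySem.Dict.ofList anns).items.flatMap fun kv => kv.2.map fun v => (v.1, v.2, kv.1))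
      (fun x => x.1) false with hts
  have hpw : ts.Pairwise (fun a b => a.1 ≤ b.1) := by
    rw [hts]; simpa using PySem.List.sorted_pairwise _ _
  have h2 := pv_outer_eq (pvStepA ms hd fl th) (0, 0, "") ts ts.length 0 ([], [], []) (by omega)
  simp only [Nat.cast_zero, List.drop_zero] at h2
  rw [h2, pv_sweep_eq ms hd fl th ts ([], [], []) hpw]
  congr 1
  refine Eq.trans
    (PySem.List.foldl_congr_mem _ _ _ _
      (fun acc x _ => pv_phase4_step acc x.2.2 (x.1, x.2.1))) ?_
  refine congrArg (fun d => List.foldl _ d _)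
    (PySem.List.foldl_congr_mem _ _ _ _ (fun acc x _ => pv_phase3_step acc x))
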